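-- pv_equiv track=rewrite | github.com/vollpfostenpi/energie-tool | Pages/1_Lastganganalyse.py | guess_datetime_col
-- ===== SOURCE A (Python) =====
-- def guess_datetime_col(cols):
--     candidates = []
--     for c in cols:
--         cl = str(c).lower()
--         score = 0
--         if any(k in cl for k in ["time", "datum", "date", "timestamp", "zeit"]):
--             score += 3
--         if "start" in cl:
--             score += 1
--         candidates.append((score, c))
--     candidates.sort(reverse=True, key=lambda x: x[0])
--     if candidates and candidates[0][0] > 0:
--         return candidates[0][1]
--     return cols[0] if cols else None
-- ===== SOURCE B (Python) =====
-- def guess_datetime_col(cols):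
--     def has_kw(cl):
--         return any(k in cl for k in ["time", "datum", "date", "timestamp", "zeit"])
--
--     def has_start(cl):
--         return "start" in cl
--
--     # priority cascade: the only possible scores in A are 4 (kw+start), 3 (kw),
--     # 1 (start), 0 — so the first column of the highest non-empty tier wins.
--     for pred in [lambda cl: has_kw(cl) and has_start(cl), has_kw, has_start]:
--         for c in cols:
--             if pred(str(c).lower()):
--                 return c
--     return cols[0] if cols else None
-- ===== Notes on version B (the rewrite author's own statement) =====
-- stated objective: alternative
-- what changed: Replaced building a (score, col) list and sorting it descending with a priority cascade of three linear searches (first column with keyword+start, else first with a keyword, else first with 'start'), exploiting that A's only possible scores are 4/3/1/0.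
import Mathlib
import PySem

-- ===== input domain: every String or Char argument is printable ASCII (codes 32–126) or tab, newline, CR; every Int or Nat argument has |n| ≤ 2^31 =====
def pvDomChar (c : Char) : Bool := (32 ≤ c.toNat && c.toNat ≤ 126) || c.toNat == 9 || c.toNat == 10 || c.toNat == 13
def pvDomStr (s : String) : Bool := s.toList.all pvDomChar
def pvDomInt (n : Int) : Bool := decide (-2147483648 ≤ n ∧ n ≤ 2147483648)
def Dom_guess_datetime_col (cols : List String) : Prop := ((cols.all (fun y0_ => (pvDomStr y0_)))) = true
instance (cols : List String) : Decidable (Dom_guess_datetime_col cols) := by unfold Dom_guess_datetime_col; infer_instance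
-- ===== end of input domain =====

-- B replaces A's score-list-plus-sort with a priority cascade of three linear searches
-- (keyword+start, then keyword, then 'start'), valid since A's only scores are 4/3/1/0.

-- ===== PORT A =====
def guess_datetime_col (cols : List String) : Option String :=
  let candidates : List (Int × String) := cols.foldl (fun acc c =>
    let cl := PySem.Str.lower c
    let score : Int := 0
    let score := if ["time", "datum", "date", "timestamp", "zeit"].any (fun k => PySem.Str.isIn k cl) then score + 3 else score
    let score := if PySem.Str.isIn "start" cl then score + 1 else score
    acc ++ [(score, c)]) []
  let candidates := PySem.List.sorted candidates (fun x => x.1) true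
  match candidates with
  | (s, c) :: _ =>
      if s > 0 then some c
      else match cols with | c0 :: _ => some c0 | [] => none
  | [] => match cols with | c0 :: _ => some c0 | [] => none

-- ===== PORT B =====
/-- B helper: the column name (lowered) contains one of the datetime keywords. -/
def pvKw (c : String) : Bool :=
  ["time", "datum", "date", "timestamp", "zeit"].any (fun k => PySem.Str.isIn k (PySem.Str.lower c))

/-- B helper: the column name (lowered) contains "start". -/
def pvStart (c : String) : Bool := PySem.Str.isIn "start" (PySem.Str.lower c)

def guess_datetime_col_alt (cols : List String) : Option String :=
  match cols.find? (fun c => pvKw c && pvStart c) with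
  | some c => some c
  | none =>
    match cols.find? pvKw with
    | some c => some c
    | none =>
      match cols.find? pvStart with
      | some c => some c
      | none => cols.head?

-- ===== PRECONDITION & SPEC =====
def Spec_guess_datetime_col (cols : List String) (out : Option String) : Prop := out = guess_datetime_col_alt cols
instance (cols : List String) (out : Option String) : Decidable (Spec_guess_datetime_col cols out) := by unfold Spec_guess_datetime_col; infer_instance

-- ===== CLAIM (what is proved, stated in full; the proofs are below) =====
def Claim_equal_guess_datetime_col : Prop := ∀ (cols : List String), Dom_guess_datetime_col cols → Spec_guess_datetime_col cols (guess_datetime_col cols)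

-- ===== LEMMAS AND PROOFS =====

/-- The keyword score A computes for one column name, in terms of B's predicates. -/
def pvScore (c : String) : Int :=
  (if pvKw c then 3 else 0) + (if pvStart c then 1 else 0)

lemma scoreA_eq (c : String) :
    (if PySem.Str.isIn "start" (PySem.Str.lower c) then
       (if ["time", "datum", "date", "timestamp", "zeit"].any (fun k => PySem.Str.isIn k (PySem.Str.lower c)) then (0 : Int) + 3 else 0) + 1
     else
       (if ["time", "datum", "date", "timestamp", "zeit"].any (fun k => PySem.Str.isIn k (PySem.Str.lower c)) then (0 : Int) + 3 else 0)) = pvScore c := by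
  unfold pvScore pvKw pvStart
  split_ifs <;> omega

/-- The head of a reverse insertion-sort fold is the running first-maximum. -/
lemma head?_foldl_insertBy {a k : Type} [LinearOrder k] (key : a -> k) :
    forall (xs acc : List a),
    (xs.foldl (fun acc x => PySem.List.insertBy (fun a b => decide (key b < key a)) x acc) acc).head? =
    xs.foldl (fun (o : Option a) x =>
      match o with
      | none => some x
      | some h => if key h < key x then some x else some h) acc.head? := by
  intro xs
  induction xs with
  | nil => intro acc; rfl
  | cons x t ih =>
    intro acc
    rw [List.foldl_cons, List.foldl_cons, ih]
    congr 1
    cases acc with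
    | nil => simp [PySem.List.insertBy]
    | cons h hs =>
      simp only [PySem.List.insertBy, List.head?_cons]
      by_cases hlt : key h < key x
      · simp [hlt]
      · simp [hlt]

/-- A's argmax (as an option fold) over pvScore. -/
def pvOptFold (cols : List String) : Option (Int × String) :=
  cols.foldl (fun o c =>
    match o with
    | none => some (pvScore c, c)
    | some h => if h.1 < pvScore c then some (pvScore c, c) else some h) none

def pvCombine (h : Int × String) (o : Option (Int × String)) : Option (Int × String) :=
  match o with
  | none => some h
  | some m => if h.1 < m.1 then some m else some h

lemma foldl_some (t : List String) : forall (h : Int × String),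
    t.foldl (fun o c =>
      match o with
      | none => some (pvScore c, c)
      | some h => if h.1 < pvScore c then some (pvScore c, c) else some h) (some h) =
    pvCombine h (pvOptFold t) := by
  induction t with
  | nil => intro h; rfl
  | cons x t ih =>
    intro h
    rw [List.foldl_cons]
    have hx : pvOptFold (x :: t) = pvCombine (pvScore x, x) (pvOptFold t) := by
      unfold pvOptFold
      rw [List.foldl_cons]
      exact ih (pvScore x, x)
    rw [hx]
    dsimp only
    by_cases h1 : h.1 < pvScore x
    · rw [if_pos h1, ih]
      unfold pvCombine
      cases hm : pvOptFold t with
      | none => simp [h1]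
      | some m =>
        by_cases h2 : pvScore x < m.1
        · simp [h2, show h.1 < m.1 by omega]
        · simp [h2, h1]
    · rw [if_neg h1, ih]
      unfold pvCombine
      cases hm : pvOptFold t with
      | none => simp [h1]
      | some m =>
        by_cases h2 : pvScore x < m.1
        · simp [h2]
        · have h3 : ¬ h.1 < m.1 := by omega
          simp [h2, h3, h1]

lemma pvOptFold_cons (c : String) (t : List String) :
    pvOptFold (c :: t) = pvCombine (pvScore c, c) (pvOptFold t) := by
  unfold pvOptFold
  rw [List.foldl_cons]
  exact foldl_some t (pvScore c, c)

/-- Characterisation of the first-maximum fold by B's priority tiers. -/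
lemma pvOptFold_cases (cols : List String) :
    (∃ d, cols.find? (fun c => pvKw c && pvStart c) = some d ∧ pvOptFold cols = some (4, d)) ∨
    (cols.find? (fun c => pvKw c && pvStart c) = none ∧
      ∃ d, cols.find? pvKw = some d ∧ pvOptFold cols = some (3, d)) ∨
    (cols.find? pvKw = none ∧
      ∃ d, cols.find? pvStart = some d ∧ pvOptFold cols = some (1, d)) ∨
    (cols.find? pvKw = none ∧ cols.find? pvStart = none ∧
      pvOptFold cols = cols.head?.map (fun c => ((0 : Int), c))) := by
  induction cols with
  | nil => exact Or.inr (Or.inr (Or.inr ⟨rfl, rfl, rfl⟩))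
  | cons c t ih =>
    have hsc : pvScore c = (if pvKw c then 3 else 0) + (if pvStart c then 1 else 0) := rfl
    rw [pvOptFold_cons]
    by_cases hk : pvKw c = true <;> by_cases hs : pvStart c = true
    · -- score 4: c wins regardless of t
      refine Or.inl ⟨c, ?_, ?_⟩
      · simp [List.find?_cons, hk, hs]
      · have h4 : pvScore c = 4 := by rw [hsc, hk, hs]; rfl
        rcases ih with ⟨d, _, hf⟩ | ⟨_, d, _, hf⟩ | ⟨_, d, _, hf⟩ | ⟨_, _, hf⟩ <;>
          rw [hf, h4] <;> unfold pvCombine <;>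
          first
          | (dsimp only; rw [if_neg (by omega)])
          | (cases t with
             | nil => rfl
             | cons c0 t0 => dsimp only [List.head?_cons, Option.map_some]; rw [if_neg (by omega)])
    · -- score 3
      have hs' : pvStart c = false := by simpa using hs
      have h3 : pvScore c = 3 := by rw [hsc, hk, hs']; rfl
      have hp1 : (pvKw c && pvStart c) = false := by rw [hk, hs']; rfl
      rcases ih with ⟨d, hf1, hf⟩ | ⟨hf1, d, hf2, hf⟩ | ⟨hf1, d, hf2, hf⟩ | ⟨hf1, hf2, hf⟩
      · refine Or.inl ⟨d, ?_, ?_⟩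
        · simp [List.find?_cons, hp1, hf1]
        · rw [hf, h3]; unfold pvCombine; dsimp only; rw [if_pos (by omega)]
      · refine Or.inr (Or.inl ⟨?_, c, ?_, ?_⟩)
        · simp [List.find?_cons, hp1, hf1]
        · simp [List.find?_cons, hk]
        · rw [hf, h3]; unfold pvCombine; dsimp only; rw [if_neg (by omega)]
      · refine Or.inr (Or.inl ⟨?_, c, ?_, ?_⟩)
        · simp only [List.find?_cons, hp1]
          rw [List.find?_eq_none] at hf1 ⊢
          intro x hx hpx
          exact absurd (hf1 x hx) (by simp [Bool.and_eq_true] at hpx; simp [hpx.1])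
        · simp [List.find?_cons, hk]
        · rw [hf, h3]; unfold pvCombine; dsimp only; rw [if_neg (by omega)]
      · refine Or.inr (Or.inl ⟨?_, c, ?_, ?_⟩)
        · simp only [List.find?_cons, hp1]
          rw [List.find?_eq_none] at hf1 ⊢
          intro x hx hpx
          exact absurd (hf1 x hx) (by simp [Bool.and_eq_true] at hpx; simp [hpx.1])
        · simp [List.find?_cons, hk]
        · rw [hf, h3]
          unfold pvCombine
          cases t with
          | nil => rfl
          | cons c0 t0 => dsimp only [List.head?_cons, Option.map_some]; rw [if_neg (by omega)]
    · -- score 1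
      have hk' : pvKw c = false := by simpa using hk
      have h1 : pvScore c = 1 := by rw [hsc, hk', hs]; rfl
      have hp1 : (pvKw c && pvStart c) = false := by rw [hk']; rfl
      rcases ih with ⟨d, hf1, hf⟩ | ⟨hf1, d, hf2, hf⟩ | ⟨hf1, d, hf2, hf⟩ | ⟨hf1, hf2, hf⟩
      · refine Or.inl ⟨d, ?_, ?_⟩
        · simp [List.find?_cons, hp1, hf1]
        · rw [hf, h1]; unfold pvCombine; dsimp only; rw [if_pos (by omega)]
      · refine Or.inr (Or.inl ⟨?_, d, ?_, ?_⟩)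
        · simp [List.find?_cons, hp1, hf1]
        · simp [List.find?_cons, hk', hf2]
        · rw [hf, h1]; unfold pvCombine; dsimp only; rw [if_pos (by omega)]
      · refine Or.inr (Or.inr (Or.inl ⟨?_, c, ?_, ?_⟩))
        · simp [List.find?_cons, hk', hf1]
        · simp [List.find?_cons, hs]
        · rw [hf, h1]; unfold pvCombine; dsimp only; rw [if_neg (by omega)]
      · refine Or.inr (Or.inr (Or.inl ⟨?_, c, ?_, ?_⟩))
        · simp [List.find?_cons, hk', hf1]
        · simp [List.find?_cons, hs]
        · rw [hf, h1]
          unfold pvCombine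
          cases t with
          | nil => rfl
          | cons c0 t0 => dsimp only [List.head?_cons, Option.map_some]; rw [if_neg (by omega)]
    · -- score 0
      have hk' : pvKw c = false := by simpa using hk
      have hs' : pvStart c = false := by simpa using hs
      have h0 : pvScore c = 0 := by rw [hsc, hk', hs']; rfl
      have hp1 : (pvKw c && pvStart c) = false := by rw [hk']; rfl
      rcases ih with ⟨d, hf1, hf⟩ | ⟨hf1, d, hf2, hf⟩ | ⟨hf1, d, hf2, hf⟩ | ⟨hf1, hf2, hf⟩
      · refine Or.inl ⟨d, ?_, ?_⟩
        · simp [List.find?_cons, hp1, hf1]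
        · rw [hf, h0]; unfold pvCombine; dsimp only; rw [if_pos (by omega)]
      · refine Or.inr (Or.inl ⟨?_, d, ?_, ?_⟩)
        · simp [List.find?_cons, hp1, hf1]
        · simp [List.find?_cons, hk', hf2]
        · rw [hf, h0]; unfold pvCombine; dsimp only; rw [if_pos (by omega)]
      · refine Or.inr (Or.inr (Or.inl ⟨?_, d, ?_, ?_⟩))
        · simp [List.find?_cons, hk', hf1]
        · simp [List.find?_cons, hs', hf2]
        · rw [hf, h0]; unfold pvCombine; dsimp only; rw [if_pos (by omega)]
      · refine Or.inr (Or.inr (Or.inr ⟨?_, ?_, ?_⟩))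
        · simp [List.find?_cons, hk', hf1]
        · simp [List.find?_cons, hs', hf2]
        · rw [hf, h0]
          unfold pvCombine
          cases t with
          | nil => rfl
          | cons c0 t0 => dsimp only [List.head?_cons, Option.map_some]; rw [if_neg (by omega)]

lemma candidates_eq : forall (cols : List String) (acc : List (Int × String)),
    cols.foldl (fun acc c =>
      let cl := PySem.Str.lower c
      let score : Int := 0
      let score := if ["time", "datum", "date", "timestamp", "zeit"].any (fun k => PySem.Str.isIn k cl) then score + 3 else score
      let score := if PySem.Str.isIn "start" cl then score + 1 else score
      acc ++ [(score, c)]) acc = acc ++ cols.map (fun c => (pvScore c, c)) := by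
  intro cols
  induction cols with
  | nil => intro acc; simp
  | cons c t ih =>
    intro acc
    rw [List.foldl_cons, ih]
    dsimp only
    rw [scoreA_eq c]
    simp

lemma sorted_head (cols : List String) :
    (PySem.List.sorted (cols.map (fun c => (pvScore c, c))) (fun x => x.1) true).head? = pvOptFold cols := by
  rw [PySem.List.sorted_rev_eq_foldl_insertBy, head?_foldl_insertBy]
  unfold pvOptFold
  rw [List.foldl_map]
  apply List.foldl_ext
  intro o c _
  cases o <;> rfl

-- ===== VERDICT (by name: the statement is the Claim_ definition above) =====
theorem guess_datetime_col_spec : Claim_equal_guess_datetime_col := by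
  intro cols _
  unfold Spec_guess_datetime_col guess_datetime_col guess_datetime_col_alt
  dsimp only
  rw [candidates_eq, List.nil_append]
  have hhead := sorted_head cols
  rcases pvOptFold_cases cols with ⟨d, hf1, hf⟩ | ⟨hf1, d, hf2, hf⟩ | ⟨hf1, d, hf2, hf⟩ | ⟨hf1, hf2, hf⟩
  · rw [hf] at hhead
    cases hS : PySem.List.sorted (cols.map (fun c => (pvScore c, c))) (fun x => x.1) true with
    | nil => rw [hS] at hhead; exact absurd hhead (by simp)
    | cons p t =>
      rw [hS, List.head?_cons] at hhead
      obtain rfl : p = (4, d) := by injection hhead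
      rw [hf1]
      norm_num
  · have hp1 : cols.find? (fun c => pvKw c && pvStart c) = none := hf1
    rw [hf] at hhead
    cases hS : PySem.List.sorted (cols.map (fun c => (pvScore c, c))) (fun x => x.1) true with
    | nil => rw [hS] at hhead; exact absurd hhead (by simp)
    | cons p t =>
      rw [hS, List.head?_cons] at hhead
      obtain rfl : p = (3, d) := by injection hhead
      rw [hp1, hf2]
      norm_num
  · have hp1 : cols.find? (fun c => pvKw c && pvStart c) = none := by
      rw [List.find?_eq_none] at hf1 ⊢
      intro x hx hpx
      exact absurd (hf1 x hx) (by simp [Bool.and_eq_true] at hpx; simp [hpx.1])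
    rw [hf] at hhead
    cases hS : PySem.List.sorted (cols.map (fun c => (pvScore c, c))) (fun x => x.1) true with
    | nil => rw [hS] at hhead; exact absurd hhead (by simp)
    | cons p t =>
      rw [hS, List.head?_cons] at hhead
      obtain rfl : p = (1, d) := by injection hhead
      rw [hp1, hf1, hf2]
      norm_num
  · have hp1 : cols.find? (fun c => pvKw c && pvStart c) = none := by
      rw [List.find?_eq_none] at hf1 ⊢
      intro x hx hpx
      exact absurd (hf1 x hx) (by simp [Bool.and_eq_true] at hpx; simp [hpx.1])
    rw [hf] at hhead
    cases cols with
    | nil =>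
      cases hS : PySem.List.sorted ([].map (fun c => (pvScore c, c))) (fun x => x.1) true with
      | nil => simp
      | cons p t => rw [hS] at hhead; exact absurd hhead (by simp)
    | cons c0 t0 =>
      cases hS : PySem.List.sorted ((c0 :: t0).map (fun c => (pvScore c, c))) (fun x => x.1) true with
      | nil => rw [hS] at hhead; exact absurd hhead (by simp)
      | cons p t =>
        rw [hS, List.head?_cons] at hhead
        obtain rfl : p = (0, c0) := by
          simp only [List.head?_cons, Option.map_some] at hhead
          injection hhead
        rw [hp1, hf1, hf2]
        norm_num
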